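-- pv_equiv track=rewrite | github.com/henrylhale/bilinear-vpd | param_decomp/app/backend/utils.py | delimit_tokens
-- ===== SOURCE A (Python) =====
-- def delimit_tokens(tokens: list[tuple[str, bool]]) -> str:
--     """Join token strings, wrapping active spans in <<delimiters>>.
--
--     Consecutive active tokens are grouped: [(" over", T), (" the", T), (" moon", T)]
--     produces " <<over the moon>>".
--     """
--     parts: list[str] = []
--     in_span = False
--     for tok, active in tokens:
--         if active and not in_span:
--             stripped = tok.lstrip()
--             parts.append(tok[: len(tok) - len(stripped)])
--             parts.append("<<")
--             parts.append(stripped)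
--             in_span = True
--         elif active:
--             parts.append(tok)
--         elif in_span:
--             parts.append(">>")
--             parts.append(tok)
--             in_span = False
--         else:
--             parts.append(tok)
--     if in_span:
--         parts.append(">>")
--     return "".join(parts)
-- ===== SOURCE B (Python) =====
-- def delimit_tokens(tokens: list[tuple[str, bool]]) -> str:
--     """Split the tokens into maximal runs of equal active-flag, then render
--     each run: inactive runs verbatim, active runs as prefix + '<<' + body + rest + '>>'."""
--     out: list[str] = []
--     i, n = 0, len(tokens)
--     while i < n:
--         flag = tokens[i][1]
--         j = i
--         while j < n and tokens[j][1] == flag: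
--             j += 1
--         run = [t for t, _ in tokens[i:j]]
--         if flag:
--             first = run[0]
--             body = first.lstrip()
--             out.append(first[: len(first) - len(body)])
--             out.append("<<")
--             out.append(body)
--             out.extend(run[1:])
--             out.append(">>")
--         else:
--             out.extend(run)
--         i = j
--     return "".join(out)
-- ===== Notes on version B (the rewrite author's own statement) =====
-- stated objective: alternative
-- what changed: B replaces A's one-token-at-a-time state machine (in_span flag toggled per token) with run-splitting: it first extracts each maximal run of equal-flag tokens and then renders each run as a whole.
import Mathlib
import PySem

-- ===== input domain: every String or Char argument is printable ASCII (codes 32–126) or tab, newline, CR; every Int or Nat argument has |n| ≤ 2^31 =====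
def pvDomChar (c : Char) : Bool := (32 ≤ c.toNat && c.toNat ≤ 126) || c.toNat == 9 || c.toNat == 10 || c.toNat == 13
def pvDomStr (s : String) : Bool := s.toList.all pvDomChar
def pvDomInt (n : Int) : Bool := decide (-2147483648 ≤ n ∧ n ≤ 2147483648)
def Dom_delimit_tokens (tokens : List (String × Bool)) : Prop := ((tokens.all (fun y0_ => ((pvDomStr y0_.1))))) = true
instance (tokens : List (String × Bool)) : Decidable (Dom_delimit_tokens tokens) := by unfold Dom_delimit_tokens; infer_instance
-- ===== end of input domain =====

-- B renders the token list run by run (maximal equal-flag runs) instead of A's per-token in_span state machine; same output, same cost.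

-- ===== PORT A =====
-- the for-loop over tokens with state (parts, in_span); the trailing `if in_span: parts.append(">>")` is the base case
def aLoop : List (String × Bool) → Bool → List String → List String
  | [], inSpan, parts => if inSpan then parts ++ [">>"] else parts
  | (tok, active) :: rest, inSpan, parts =>
    if active && !inSpan then
      let stripped := PySem.Str.lstrip tok
      aLoop rest true (parts ++ [PySem.Str.slice tok none (some ((PySem.Str.len tok : Int) - (PySem.Str.len stripped : Int))), "<<", stripped])
    else if active then
      aLoop rest inSpan (parts ++ [tok])
    else if inSpan then
      aLoop rest false (parts ++ [">>", tok])
    else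
      aLoop rest inSpan (parts ++ [tok])

def delimit_tokens (tokens : List (String × Bool)) : String :=
  PySem.Str.join "" (aLoop tokens false [])

-- ===== PORT B =====
-- the outer while over runs: peel off the maximal run sharing the head's flag, render it, recurse on the remainder
def bGo : List (String × Bool) → List String
  | [] => []
  | (t, flag) :: rest =>
    let runTail := rest.takeWhile (fun p => p.2 == flag)
    let rest' := rest.dropWhile (fun p => p.2 == flag)
    (if flag then
       let body := PySem.Str.lstrip t
       [PySem.Str.slice t none (some ((PySem.Str.len t : Int) - (PySem.Str.len body : Int))), "<<", body]
         ++ runTail.map (·.1) ++ [">>"]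
     else t :: runTail.map (·.1)) ++ bGo rest'
termination_by l => l.length
decreasing_by
  simp only [List.length_cons]
  exact Nat.lt_succ_of_le (List.length_dropWhile_le _ _)

def delimit_tokens_alt (tokens : List (String × Bool)) : String :=
  PySem.Str.join "" (bGo tokens)

-- ===== PRECONDITION & SPEC =====
def Spec_delimit_tokens (tokens : List (String × Bool)) (out : String) : Prop := out = delimit_tokens_alt tokens
instance (tokens : List (String × Bool)) (out : String) : Decidable (Spec_delimit_tokens tokens out) := by unfold Spec_delimit_tokens; infer_instance

-- ===== CLAIM (what is proved, stated in full; the proofs are below) =====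
def Claim_equal_delimit_tokens : Prop := ∀ (tokens : List (String × Bool)), Dom_delimit_tokens tokens → Spec_delimit_tokens tokens (delimit_tokens tokens)

-- ===== LEMMAS AND PROOFS =====
theorem aLoop_acc (l : List (String × Bool)) (s : Bool) (parts : List String) :
    aLoop l s parts = parts ++ aLoop l s [] := by
  induction l generalizing s parts with
  | nil => simp only [aLoop]; split <;> simp
  | cons h rest ih =>
    obtain ⟨tok, active⟩ := h
    simp only [aLoop]
    split
    · rw [ih, ih _ ([] ++ _)]; simp
    · split
      · rw [ih, ih _ ([] ++ _)]; simp
      · split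
        · rw [ih, ih _ ([] ++ _)]; simp
        · rw [ih, ih _ ([] ++ _)]; simp

theorem aLoop_true (l : List (String × Bool)) :
    aLoop l true [] = (l.takeWhile (fun p => p.2 == true)).map (·.1) ++ [">>"]
      ++ aLoop (l.dropWhile (fun p => p.2 == true)) false [] := by
  induction l with
  | nil => simp [aLoop]
  | cons h rest ih =>
    obtain ⟨tok, active⟩ := h
    cases active with
    | true =>
      simp only [aLoop, List.takeWhile_cons, List.dropWhile_cons]
      simp only [List.nil_append, Bool.and_not_self, Bool.false_eq_true, if_false]
      rw [aLoop_acc rest true [tok], ih]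
      simp
    | false =>
      simp only [aLoop, List.takeWhile_cons, List.dropWhile_cons]
      simp only [List.nil_append]
      norm_num
      conv_rhs => rw [aLoop]
      norm_num
      rw [aLoop_acc rest false [">>", tok], aLoop_acc rest false [tok]]
      simp

theorem aLoop_false (l : List (String × Bool)) :
    aLoop l false [] = (l.takeWhile (fun p => p.2 == false)).map (·.1)
      ++ aLoop (l.dropWhile (fun p => p.2 == false)) false [] := by
  induction l with
  | nil => simp [aLoop]
  | cons h rest ih =>
    obtain ⟨tok, active⟩ := h
    cases active with
    | true =>
      simp
    | false =>
      simp only [aLoop, List.takeWhile_cons, List.dropWhile_cons]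
      simp only [List.nil_append]
      norm_num
      rw [aLoop_acc rest false [tok], ih]
      simp

theorem aLoop_eq_bGo (l : List (String × Bool)) : aLoop l false [] = bGo l := by
  induction hn : l.length using Nat.strong_induction_on generalizing l with
  | _ n ih =>
    match l with
    | [] => simp [aLoop, bGo]
    | (t, flag) :: rest =>
      cases flag with
      | true =>
        rw [bGo]
        simp only [aLoop, List.nil_append]
        norm_num
        rw [aLoop_acc rest true _, aLoop_true,
          ih _ (by subst hn; exact Nat.lt_succ_of_le (List.length_dropWhile_le _ _)) _ rfl]
        simp
      | false =>
        rw [bGo]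
        simp only [aLoop, List.nil_append]
        norm_num
        rw [aLoop_acc rest false [t], aLoop_false,
          ih _ (by subst hn; exact Nat.lt_succ_of_le (List.length_dropWhile_le _ _)) _ rfl]
        simp

-- ===== VERDICT (by name: the statement is the Claim_ definition above) =====
theorem delimit_tokens_spec : Claim_equal_delimit_tokens := by
  intro tokens _
  unfold Spec_delimit_tokens delimit_tokens delimit_tokens_alt
  rw [aLoop_eq_bGo]
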